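-- pv_equiv track=rewrite | github.com/TxT1212/colmap | scripts/sfm_toolkits/ezxr_sfm/colmap_process_loop_folders/tree_topology.py | getMergeOrders
-- ===== SOURCE A (Python) =====
-- def getNodeWithMaxNumNeighbors(tarNodeList, nodesNeighbors, nodesPicks):
--     outNode = ""
--     maxNumNeighbors = -1
--
--     for node in tarNodeList:
--         numNeighbors = len(nodesNeighbors[node])
--         if (not nodesPicks[node]) and (numNeighbors>maxNumNeighbors):
--             outNode = node
--             maxNumNeighbors = numNeighbors
--
--     return outNode
--
-- def getMergeOrders(nodes, edges, interconnected=True):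
--     orders = []
--
--     if not interconnected:
--         orders = nodes.copy()
--     else:
--         # create nodesNeighbors dict
--         nodesNeighbors = {}
--         nodesPicks = {}
--         for node in nodes:
--             nodesNeighbors[node] = []
--             nodesPicks[node] = False
--
--         # get neighbors for each node
--         for edge in edges:
--             nodesNeighbors[edge[0]].append(edge[1])
--             nodesNeighbors[edge[1]].append(edge[0])
--
--         tarNodeList = list(nodesNeighbors.keys())
--         while len(orders) < len(nodes):
--             pickNode = getNodeWithMaxNumNeighbors(tarNodeList, nodesNeighbors, nodesPicks)
--
--             if pickNode=='':
--                 raise Exception('pickNode is empty, meaning the scene graph of current node is broken.\n')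
--
--             orders.append(pickNode)
--             nodesPicks[pickNode] = True
--             tarNodeList = getAssociatedNodes(orders, nodesNeighbors)
--
--     return orders
--
-- def getAssociatedNodes(pickedNodes, nodesNeighbors):
--     assocNodes = []
--
--     for pickNode in pickedNodes:
--         neighbors = nodesNeighbors[pickNode]
--
--         for node in neighbors:
--             if not (node in assocNodes):
--                 assocNodes.append(node)
--
--     return assocNodes
-- ===== SOURCE B (Python) =====
-- def getMergeOrders(nodes, edges, interconnected=True):
--     # Incremental frontier + precomputed degrees: the same greedy order as the
--     # rebuild-everything original, computed without re-deriving the frontier each round.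
--     if not interconnected:
--         return nodes.copy()
--     deg = {}
--     nbrs = {}
--     for n in nodes:
--         deg[n] = 0
--         nbrs[n] = []
--     for e in edges:
--         a, b = e[0], e[1]
--         nbrs[a].append(b)
--         nbrs[b].append(a)
--         deg[a] += 1
--         deg[b] += 1
--     orders = []
--     picked = set()
--     frontier = []      # discovered neighbours, in first-appearance order
--     seen = set()
--     while len(orders) < len(nodes):
--         if not orders:
--             cur = max(nodes, key=lambda n: deg[n])
--         else:
--             cur = ""
--             bestd = -1
--             for v in frontier:
--                 if v not in picked and deg[v] > bestd:
--                     cur = v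
--                     bestd = deg[v]
--             if cur == "":
--                 raise Exception('pickNode is empty, meaning the scene graph of current node is broken.\n')
--         orders.append(cur)
--         picked.add(cur)
--         for v in nbrs[cur]:
--             if v not in seen:
--                 seen.add(v)
--                 frontier.append(v)
--     return orders
-- ===== Notes on version B (the rewrite author's own statement) =====
-- stated objective: alternative
-- what changed: B precomputes each node's degree once and grows the discovered-neighbour frontier incrementally with a seen-set (plus Python's built-in max for the first pick), instead of A's rebuilding the whole associated-node list from scratch with a linear membership scan after every pick and re-counting neighbour lists in every scan.
import Mathlib
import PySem

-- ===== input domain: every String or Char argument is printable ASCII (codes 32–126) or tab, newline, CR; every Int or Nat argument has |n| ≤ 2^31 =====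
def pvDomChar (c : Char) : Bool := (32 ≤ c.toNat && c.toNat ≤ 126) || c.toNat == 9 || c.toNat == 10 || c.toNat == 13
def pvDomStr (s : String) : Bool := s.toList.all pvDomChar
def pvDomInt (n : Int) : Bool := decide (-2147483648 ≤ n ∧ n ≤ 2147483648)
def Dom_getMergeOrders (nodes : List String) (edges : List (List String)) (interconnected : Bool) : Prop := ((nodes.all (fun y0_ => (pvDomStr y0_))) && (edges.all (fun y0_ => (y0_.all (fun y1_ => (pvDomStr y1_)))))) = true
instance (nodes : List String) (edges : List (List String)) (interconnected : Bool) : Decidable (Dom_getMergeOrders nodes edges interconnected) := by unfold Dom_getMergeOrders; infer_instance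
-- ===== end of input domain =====

-- B replaces A's per-round rebuild of the associated-node list (with linear membership
-- scans and re-counted neighbour lists) by a precomputed degree dict and an incrementally
-- grown frontier with a seen-set; the same greedy merge order, computed differently.

-- ===== PORT A =====
-- helper getNodeWithMaxNumNeighbors: linear scan keeping (outNode, maxNumNeighbors)
def pyGetNodeWithMaxNumNeighbors (tarNodeList : List String)
    (nodesNeighbors : PySem.Dict String (List String))
    (nodesPicks : PySem.Dict String Bool) : String :=
  (tarNodeList.foldl (fun (st : String × Int) node =>
      let numNeighbors : Int := ((nodesNeighbors.getD node []).length : Int)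
      if nodesPicks.getD node false = false ∧ st.2 < numNeighbors then (node, numNeighbors) else st)
    ("", -1)).1

-- helper getAssociatedNodes: rebuild the dedup'd neighbour list of all picked nodes
def pyGetAssociatedNodes (pickedNodes : List String)
    (nodesNeighbors : PySem.Dict String (List String)) : List String :=
  pickedNodes.foldl (fun assocNodes pickNode =>
    (nodesNeighbors.getD pickNode []).foldl
      (fun assocNodes node => if node ∈ assocNodes then assocNodes else assocNodes ++ [node])
      assocNodes) []

-- the while-loop; fuel = len(nodes) suffices since orders grows each round.
-- 'pickNode = ""' is where Python raises: the port stops there (outside Pre_).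
def pyMergeLoop (nb : PySem.Dict String (List String)) (n : Nat) :
    Nat → List String → PySem.Dict String Bool → List String → List String
  | 0, _, _, orders => orders
  | fuel+1, tar, picks, orders =>
    if orders.length < n then
      let pickNode := pyGetNodeWithMaxNumNeighbors tar nb picks
      if pickNode = "" then orders
      else pyMergeLoop nb n fuel (pyGetAssociatedNodes (orders ++ [pickNode]) nb)
             (picks.insert pickNode true) (orders ++ [pickNode])
    else orders

def getMergeOrders (nodes : List String) (edges : List (List String)) (interconnected : Bool) : List String :=
  if interconnected = false then nodes
  else
    -- one loop over nodes fills both dicts (pair state, as in the Python)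
    let init := nodes.foldl
      (fun (p : PySem.Dict String (List String) × PySem.Dict String Bool) node =>
        (p.1.insert node [], p.2.insert node false))
      (PySem.Dict.empty, PySem.Dict.empty)
    let nb := edges.foldl
      (fun d edge => match edge with
        | a :: b :: _ => (d.modify a [] (· ++ [b])).modify b [] (· ++ [a])
        | _ => d) init.1
    pyMergeLoop nb nodes.length nodes.length nb.keys init.2 []

-- ===== PORT B =====
-- scan of the current frontier for the unpicked node of maximal (precomputed) degree
def altScan (frontier : List String) (deg : PySem.Dict String Int)
    (picked : PySem.Set String) : String :=
  (frontier.foldl (fun (st : String × Int) v =>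
      if picked.contains v = false ∧ st.2 < deg.getD v 0 then (v, deg.getD v 0) else st)
    ("", -1)).1

-- append the not-yet-seen neighbours of the picked node to the frontier
def altExtend (fs : List String × PySem.Set String) (ns : List String) :
    List String × PySem.Set String :=
  ns.foldl (fun fs v => if fs.2.contains v then fs else (fs.1 ++ [v], fs.2.add v)) fs

def altDegStep (d : PySem.Dict String Int) (e : List String) : PySem.Dict String Int :=
  match e with
  | [] => d
  | a :: rest =>
    match rest with
    | [] => d
    | b :: _ => (d.modify a 0 (· + 1)).modify b 0 (· + 1)

def altNbStep (d : PySem.Dict String (List String)) (e : List String) :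
    PySem.Dict String (List String) :=
  match e with
  | [] => d
  | a :: rest =>
    match rest with
    | [] => d
    | b :: _ => (d.modify a [] (· ++ [b])).modify b [] (· ++ [a])

-- the while-loop of B: first pick by built-in max, later picks by frontier scan;
-- scan result "" is where Python raises: the port stops there (outside Pre_).
def altLoop (nodes : List String) (deg : PySem.Dict String Int)
    (nb : PySem.Dict String (List String)) (n : Nat) :
    Nat → List String → PySem.Set String → List String → PySem.Set String → List String
  | 0, orders, _, _, _ => orders
  | fuel+1, orders, picked, frontier, seen =>
    if orders.length < n then
      let cur? : Option String :=
        if orders.isEmpty then PySem.List.max? nodes (fun v => deg.getD v 0)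
        else (fun c => if c = "" then none else some c) (altScan frontier deg picked)
      match cur? with
      | none => orders
      | some cur =>
        let fs := altExtend (frontier, seen) (nb.getD cur [])
        altLoop nodes deg nb n fuel (orders ++ [cur]) (picked.add cur) fs.1 fs.2
    else orders

def getMergeOrders_alt (nodes : List String) (edges : List (List String)) (interconnected : Bool) : List String :=
  if interconnected = false then nodes
  else
    let init := nodes.foldl
      (fun (p : PySem.Dict String Int × PySem.Dict String (List String)) node =>
        (p.1.insert node 0, p.2.insert node []))
      (PySem.Dict.empty, PySem.Dict.empty)
    let dn := edges.foldl (fun p e => (altDegStep p.1 e, altNbStep p.2 e)) init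
    altLoop nodes dn.1 dn.2 nodes.length nodes.length [] PySem.Set.empty [] PySem.Set.empty

-- ===== PRECONDITION & SPEC =====
-- one pass over the edges, growing the reached set where an endpoint is already reached
def pvAdjStep (edges : List (List String)) (S : PySem.Set String) : PySem.Set String :=
  edges.foldl (fun S e =>
    if S.contains (e.getD 0 "") || S.contains (e.getD 1 "") then
      (S.add (e.getD 0 "")).add (e.getD 1 "")
    else S) S

def pvReach (edges : List (List String)) : Nat → PySem.Set String → PySem.Set String
  | 0, S => S
  | k+1, S => pvReach edges k (pvAdjStep edges S)

-- Pre_ excludes exactly the inputs where Python A raises: with interconnected=True,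
-- duplicate node names, a node named "" (A's empty-pick sentinel), an edge that is too
-- short or mentions a name not in nodes (IndexError/KeyError), or a graph that is not
-- connected (A's explicit 'pickNode is empty' exception).
def Pre_getMergeOrders (nodes : List String) (edges : List (List String)) (interconnected : Bool) : Prop :=
  interconnected = true →
    (nodes.Nodup ∧ "" ∉ nodes ∧
     (∀ e ∈ edges, 2 ≤ e.length ∧ e.getD 0 "" ∈ nodes ∧ e.getD 1 "" ∈ nodes) ∧
     ∀ v ∈ nodes, v ∈ pvReach edges nodes.length (PySem.Set.ofList (nodes.take 1)))

instance (nodes : List String) (edges : List (List String)) (interconnected : Bool) : Decidable (Pre_getMergeOrders nodes edges interconnected) := by unfold Pre_getMergeOrders; infer_instance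

def pvWitness_getMergeOrders : List String × List (List String) × Bool :=
  (["a", "b", "c"], [["a", "b"], ["b", "c"]], true)

def Spec_getMergeOrders (nodes : List String) (edges : List (List String)) (interconnected : Bool) (out : List String) : Prop := out = getMergeOrders_alt nodes edges interconnected
instance (nodes : List String) (edges : List (List String)) (interconnected : Bool) (out : List String) : Decidable (Spec_getMergeOrders nodes edges interconnected out) := by unfold Spec_getMergeOrders; infer_instance

-- ===== CLAIM (what is proved, stated in full; the proofs are below) =====
def Claim_equal_getMergeOrders : Prop := ∀ (nodes : List String) (edges : List (List String)) (interconnected : Bool), Dom_getMergeOrders nodes edges interconnected → Pre_getMergeOrders nodes edges interconnected → Spec_getMergeOrders nodes edges interconnected (getMergeOrders nodes edges interconnected)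

-- ===== LEMMAS AND PROOFS =====

-- getD after a fold inserting the same constant value at every key of l
theorem getD_foldl_insert_const {ν : Type} (l : List String)
    (d : PySem.Dict String ν) (c dflt : ν) (v : String) :
    ((l.foldl (fun d n => d.insert n c) d).getD v dflt)
      = if v ∈ l then c else d.getD v dflt := by
  induction l generalizing d with
  | nil => simp
  | cons x t ih =>
      simp only [List.foldl_cons, ih, List.mem_cons, PySem.Dict.getD_insert]
      by_cases hvx : v = x <;> by_cases hvt : v ∈ t <;> simp [hvx, hvt]

-- Set.add in terms of contains
theorem set_contains_add (s : PySem.Set String) (x y : String) :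
    (s.add x).contains y = (s.contains y || y == x) := by
  unfold PySem.Set.add PySem.Set.contains
  by_cases hx : List.contains s x
  · simp only [hx, if_true]
    by_cases hyx : y = x
    · subst hyx; simp [List.contains_eq_mem] at hx ⊢; simp [hx]
    · simp [beq_iff_eq, hyx]
  · simp only [hx, Bool.false_eq_true, if_false]
    by_cases hyx : y = x <;> simp [List.contains_eq_mem, beq_iff_eq, hyx]

-- one edge step leaves the key list unchanged when both endpoints are keys
theorem keys_altNbStep (d : PySem.Dict String (List String)) (e : List String)
    (h0 : e.getD 0 "" ∈ d.keys) (h1 : e.getD 1 "" ∈ d.keys) :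
    (altNbStep d e).keys = d.keys := by
  match e with
  | [] => rfl
  | [a] => rfl
  | a :: b :: rest =>
      simp only [List.getD, List.getElem?_cons_zero, Option.getD_some] at h0
      have h1' : b ∈ d.keys := by simpa using h1
      unfold altNbStep
      have hca : d.contains a = true := (PySem.Dict.contains_iff_mem_keys d a).2 h0
      have hcb : (d.modify a [] (· ++ [b])).contains b = true := by
        rw [PySem.Dict.contains_modify]
        simp [(PySem.Dict.contains_iff_mem_keys d b).2 h1']
      rw [PySem.Dict.keys_modify, PySem.Dict.keys_insert_of_contains _ _ hcb,
          PySem.Dict.keys_modify, PySem.Dict.keys_insert_of_contains _ _ hca]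

-- keys are unchanged by the whole edge fold
theorem keys_edge_fold (edges : List (List String))
    (d : PySem.Dict String (List String))
    (h : ∀ e ∈ edges, e.getD 0 "" ∈ d.keys ∧ e.getD 1 "" ∈ d.keys) :
    (edges.foldl altNbStep d).keys = d.keys := by
  induction edges generalizing d with
  | nil => rfl
  | cons e t ih =>
      have he := h e (List.mem_cons_self)
      have hk := keys_altNbStep d e he.1 he.2
      simp only [List.foldl_cons]
      rw [ih (altNbStep d e)
            (fun e' he' => by rw [hk]; exact h e' (List.mem_cons_of_mem _ he')), hk]

-- the degree dict tracks the neighbour-list lengths through one edge step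
theorem deg_len_step (dd : PySem.Dict String Int) (dn : PySem.Dict String (List String))
    (e : List String) (h : ∀ v, dd.getD v 0 = ((dn.getD v []).length : Int)) (v : String) :
    (altDegStep dd e).getD v 0 = (((altNbStep dn e).getD v []).length : Int) := by
  match e with
  | [] => exact h v
  | [a] => exact h v
  | a :: b :: rest =>
      unfold altDegStep altNbStep
      simp only [PySem.Dict.getD_modify]
      split_ifs <;> subst_eqs <;> simp [h, List.length_append] <;> omega

-- … and through the whole edge fold
theorem deg_len (edges : List (List String)) (dd : PySem.Dict String Int)
    (dn : PySem.Dict String (List String))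
    (h : ∀ v, dd.getD v 0 = ((dn.getD v []).length : Int)) (v : String) :
    (edges.foldl altDegStep dd).getD v 0
      = (((edges.foldl altNbStep dn).getD v []).length : Int) := by
  induction edges generalizing dd dn with
  | nil => exact h v
  | cons e t ih =>
      simp only [List.foldl_cons]
      exact ih _ _ (deg_len_step dd dn e h)

-- altExtend computes A's dedup-append inner loop, and keeps the seen-set exact
theorem altExtend_spec (ns : List String) (f : List String) (s : PySem.Set String)
    (h : ∀ v, s.contains v = decide (v ∈ f)) :
    (altExtend (f, s) ns).1
        = ns.foldl (fun acc v => if v ∈ acc then acc else acc ++ [v]) f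
      ∧ ∀ v, (altExtend (f, s) ns).2.contains v = decide (v ∈ (altExtend (f, s) ns).1) := by
  induction ns generalizing f s with
  | nil => exact ⟨rfl, h⟩
  | cons x t ih =>
      have hstep : altExtend (f, s) (x :: t)
          = altExtend (if s.contains x then (f, s) else (f ++ [x], s.add x)) t := rfl
      by_cases hx : x ∈ f
      · have hc : s.contains x = true := by rw [h x]; simp [hx]
        rw [hstep]
        simp only [hc, if_true, List.foldl_cons, if_pos hx]
        exact ih f s h
      · have hc : s.contains x = false := by rw [h x]; simp [hx]
        have h' : ∀ v, (s.add x).contains v = decide (v ∈ f ++ [x]) := by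
          intro v
          rw [set_contains_add, h v]
          by_cases hv : v = x <;> simp [hv, List.mem_append]
        rw [hstep]
        simp only [hc, Bool.false_eq_true, if_false, List.foldl_cons, if_neg hx]
        exact ih (f ++ [x]) (s.add x) h'

-- the two scans agree when deg tracks lengths and picked tracks picks
theorem scan_eq (tar : List String) (nb : PySem.Dict String (List String))
    (deg : PySem.Dict String Int) (picks : PySem.Dict String Bool)
    (picked : PySem.Set String)
    (hdeg : ∀ v, deg.getD v 0 = ((nb.getD v []).length : Int))
    (hpk : ∀ v, picks.getD v false = picked.contains v) :
    altScan tar deg picked = pyGetNodeWithMaxNumNeighbors tar nb picks := by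
  unfold altScan pyGetNodeWithMaxNumNeighbors
  congr 1
  apply PySem.List.foldl_congr_mem
  intro acc x _
  rw [hdeg x, ← hpk x]

-- the running (node, best) pair scan is Python's max with key (first maximum)
theorem scan_pair_eq_max? (key : String → Int) (t : List String) (m : String) :
    (t.foldl (fun (st : String × Int) v =>
        if st.2 < key v then (v, key v) else st) (m, key m)).1
      = (PySem.List.max? (m :: t) key).getD "" := by
  induction t generalizing m with
  | nil => rfl
  | cons x t ih =>
      simp only [PySem.List.max?, List.foldl_cons] at ih ⊢
      by_cases hx : key m < key x
      · simp only [hx, if_true]; exact ih x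
      · simp only [hx, if_false]; exact ih m

-- A's scan with nothing picked is Python's max(l, key=…)
theorem scan_no_picks_eq_max (l : List String)
    (nb : PySem.Dict String (List String)) (picks : PySem.Dict String Bool)
    (hpk : ∀ v, picks.getD v false = false) :
    pyGetNodeWithMaxNumNeighbors l nb picks
      = (PySem.List.max? l (fun v => ((nb.getD v []).length : Int))).getD "" := by
  unfold pyGetNodeWithMaxNumNeighbors
  have hcongr : l.foldl (fun (st : String × Int) node =>
      let numNeighbors : Int := ((nb.getD node []).length : Int)
      if picks.getD node false = false ∧ st.2 < numNeighbors then (node, numNeighbors) else st)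
      ("", -1)
      = l.foldl (fun (st : String × Int) node =>
          if st.2 < ((nb.getD node []).length : Int)
          then (node, ((nb.getD node []).length : Int)) else st) ("", -1) := by
    apply PySem.List.foldl_congr_mem
    intro acc x _
    simp [hpk x]
  rw [hcongr]
  cases l with
  | nil => rfl
  | cons x t =>
      simp only [List.foldl_cons]
      have h0 : ((-1 : Int) < ((nb.getD x []).length : Int)) := by omega
      simp only [h0, if_true]
      exact scan_pair_eq_max? (fun v => ((nb.getD v []).length : Int)) t x

-- the picked-dict / picked-set invariant survives one pick
theorem pick_invariant (picks : PySem.Dict String Bool) (picked : PySem.Set String)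
    (p : String) (hpk : ∀ v, picks.getD v false = picked.contains v) (v : String) :
    (picks.insert p true).getD v false = (picked.add p).contains v := by
  rw [PySem.Dict.getD_insert, set_contains_add, hpk v]
  by_cases hv : v = p <;> simp [hv, beq_iff_eq]

-- the two loops agree from any aligned state with at least one pick made
theorem loop_eq (nodes : List String) (nb : PySem.Dict String (List String))
    (deg : PySem.Dict String Int) (n : Nat) (fuel : Nat) (orders tar : List String)
    (picks : PySem.Dict String Bool) (picked : PySem.Set String)
    (frontier : List String) (seen : PySem.Set String)
    (hdeg : ∀ v, deg.getD v 0 = ((nb.getD v []).length : Int))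
    (hpk : ∀ v, picks.getD v false = picked.contains v)
    (htar : tar = pyGetAssociatedNodes orders nb)
    (hfr : frontier = tar)
    (hseen : ∀ v, seen.contains v = decide (v ∈ frontier))
    (hne : orders ≠ []) :
    pyMergeLoop nb n fuel tar picks orders
      = altLoop nodes deg nb n fuel orders picked frontier seen := by
  induction fuel generalizing orders tar picks picked frontier seen with
  | zero => rfl
  | succ fuel ih =>
      rw [pyMergeLoop, altLoop]
      by_cases hlen : orders.length < n
      · simp only [hlen, if_true]
        have hemp : orders.isEmpty = false := by
          cases orders with
          | nil => exact absurd rfl hne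
          | cons a b => rfl
        have hscan : altScan frontier deg picked
            = pyGetNodeWithMaxNumNeighbors tar nb picks := by
          rw [hfr]; exact scan_eq tar nb deg picks picked hdeg hpk
        simp only [hemp, Bool.false_eq_true, if_false, hscan]
        by_cases hp : pyGetNodeWithMaxNumNeighbors tar nb picks = ""
        · simp [hp]
        · simp only [hp, if_false]
          set p := pyGetNodeWithMaxNumNeighbors tar nb picks with hpdef
          have spec := altExtend_spec (nb.getD p []) frontier seen hseen
          have hassoc : pyGetAssociatedNodes (orders ++ [p]) nb
              = (nb.getD p []).foldl
                  (fun acc v => if v ∈ acc then acc else acc ++ [v]) tar := by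
            unfold pyGetAssociatedNodes
            rw [List.foldl_append]
            simp only [List.foldl_cons, List.foldl_nil]
            rw [htar]; rfl
          have hfr' : (altExtend (frontier, seen) (nb.getD p [])).1
              = pyGetAssociatedNodes (orders ++ [p]) nb := by
            rw [spec.1, hassoc, hfr]
          exact ih (orders ++ [p]) _ (picks.insert p true) (picked.add p)
            (altExtend (frontier, seen) (nb.getD p [])).1
            (altExtend (frontier, seen) (nb.getD p [])).2
            (pick_invariant picks picked p hpk) rfl hfr'
            (fun v => by rw [spec.2 v]) (by simp)
      · simp [hlen]

-- the interconnected=True case, assembled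
theorem main_true (nodes : List String) (edges : List (List String))
    (hnd : nodes.Nodup) (hns : "" ∉ nodes)
    (hwf : ∀ e ∈ edges, 2 ≤ e.length ∧ e.getD 0 "" ∈ nodes ∧ e.getD 1 "" ∈ nodes) :
    getMergeOrders nodes edges true = getMergeOrders_alt nodes edges true := by
  unfold getMergeOrders getMergeOrders_alt
  rw [if_neg (by simp), if_neg (by simp)]
  dsimp only
  have h1 : nodes.foldl
      (fun (p : PySem.Dict String (List String) × PySem.Dict String Bool) node =>
        (p.1.insert node [], p.2.insert node false))
      (PySem.Dict.empty, PySem.Dict.empty)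
      = (nodes.foldl (fun d node => d.insert node ([] : List String)) PySem.Dict.empty,
         nodes.foldl (fun d node => d.insert node false) PySem.Dict.empty) :=
    PySem.List.foldl_prod_mk
      (fun (d : PySem.Dict String (List String)) node => d.insert node [])
      (fun (d : PySem.Dict String Bool) node => d.insert node false)
      nodes PySem.Dict.empty PySem.Dict.empty
  have h2 : nodes.foldl
      (fun (p : PySem.Dict String Int × PySem.Dict String (List String)) node =>
        (p.1.insert node 0, p.2.insert node []))
      (PySem.Dict.empty, PySem.Dict.empty)
      = (nodes.foldl (fun d node => d.insert node (0 : Int)) PySem.Dict.empty,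
         nodes.foldl (fun d node => d.insert node ([] : List String)) PySem.Dict.empty) :=
    PySem.List.foldl_prod_mk
      (fun (d : PySem.Dict String Int) node => d.insert node 0)
      (fun (d : PySem.Dict String (List String)) node => d.insert node [])
      nodes PySem.Dict.empty PySem.Dict.empty
  have h3 : edges.foldl
      (fun (p : PySem.Dict String Int × PySem.Dict String (List String)) e =>
        (altDegStep p.1 e, altNbStep p.2 e))
      (nodes.foldl (fun d node => d.insert node (0 : Int)) PySem.Dict.empty,
       nodes.foldl (fun d node => d.insert node ([] : List String)) PySem.Dict.empty)
      = (edges.foldl altDegStep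
           (nodes.foldl (fun d node => d.insert node (0 : Int)) PySem.Dict.empty),
         edges.foldl altNbStep
           (nodes.foldl (fun d node => d.insert node ([] : List String)) PySem.Dict.empty)) :=
    PySem.List.foldl_prod_mk altDegStep altNbStep edges _ _
  rw [h1, h2, h3]
  have hstep : edges.foldl
      (fun d edge => match edge with
        | a :: b :: _ => (d.modify a [] (· ++ [b])).modify b [] (· ++ [a])
        | _ => d)
      (nodes.foldl (fun d node => d.insert node ([] : List String)) PySem.Dict.empty)
      = edges.foldl altNbStep
          (nodes.foldl (fun d node => d.insert node ([] : List String)) PySem.Dict.empty) := by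
    apply PySem.List.foldl_congr_mem
    intro acc e _
    match e with
    | [] => rfl
    | [a] => rfl
    | a :: b :: r => rfl
  rw [hstep]
  set nb0 := nodes.foldl (fun d node => d.insert node ([] : List String)) PySem.Dict.empty with hnb0
  set nbB := edges.foldl altNbStep nb0 with hnbB
  set degB := edges.foldl altDegStep
      (nodes.foldl (fun d node => d.insert node (0 : Int)) PySem.Dict.empty) with hdegB
  set pk0 := nodes.foldl (fun d node => d.insert node false) PySem.Dict.empty with hpk0def
  have hk0 : nb0.keys = nodes := by
    rw [hnb0, PySem.Dict.keys_foldl_insert]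
    simp only [PySem.Dict.keys_empty]
    exact PySem.Set.ofList_eq_self_of_nodup nodes hnd
  have hkeys : nbB.keys = nodes := by
    rw [hnbB, keys_edge_fold edges nb0
      (fun e he => by rw [hk0]; exact ⟨(hwf e he).2.1, (hwf e he).2.2⟩)]
    exact hk0
  have hdeg : ∀ v, degB.getD v 0 = ((nbB.getD v []).length : Int) := by
    intro v
    rw [hdegB, hnbB]
    refine deg_len edges _ _ (fun v => ?_) v
    rw [hnb0, getD_foldl_insert_const, getD_foldl_insert_const]
    split <;> simp
  have hpk0 : ∀ v, pk0.getD v false = false := by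
    intro v
    rw [hpk0def, getD_foldl_insert_const]
    split <;> simp
  have hpk0set : ∀ v, pk0.getD v false = PySem.Set.empty.contains v := by
    intro v; rw [hpk0 v]; rfl
  cases nodes with
  | nil => rfl
  | cons x t =>
      rw [hkeys]
      simp only [List.length_cons]
      rw [pyMergeLoop, altLoop]
      simp only [List.length_nil, Nat.zero_lt_succ, if_true, List.isEmpty_nil]
      have hmaxcongr : PySem.List.max? (x :: t) (fun v => degB.getD v 0)
          = PySem.List.max? (x :: t) (fun v => ((nbB.getD v []).length : Int)) := by
        unfold PySem.List.max?
        apply PySem.List.foldl_congr_mem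
        intro acc v _
        cases acc with
        | none => rfl
        | some m => simp only [hdeg m, hdeg v]
      have hpickA : pyGetNodeWithMaxNumNeighbors (x :: t) nbB pk0
          = (PySem.List.max? (x :: t) (fun v => ((nbB.getD v []).length : Int))).getD "" :=
        scan_no_picks_eq_max (x :: t) nbB pk0 hpk0
      rw [hmaxcongr, hpickA]
      cases hm : PySem.List.max? (x :: t) (fun v => ((nbB.getD v []).length : Int)) with
      | none => exact absurd ((PySem.List.max?_eq_none_iff _ _).1 hm) (by simp)
      | some c =>
          have hcmem : c ∈ x :: t := PySem.List.max?_mem hm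
          have hcne : ¬ (c = "") := fun h => hns (h ▸ hcmem)
          simp only [Option.getD_some, hcne, if_false, List.nil_append]
          have spec := altExtend_spec (nbB.getD c []) [] PySem.Set.empty
            (fun v => by rfl)
          refine loop_eq (x :: t) nbB degB (t.length + 1) t.length [c] _
            (pk0.insert c true) (PySem.Set.empty.add c)
            (altExtend ([], PySem.Set.empty) (nbB.getD c [])).1
            (altExtend ([], PySem.Set.empty) (nbB.getD c [])).2
            hdeg (pick_invariant pk0 PySem.Set.empty c hpk0set) rfl ?_ ?_ (by simp)
          · rw [spec.1]
            unfold pyGetAssociatedNodes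
            simp only [List.foldl_cons, List.foldl_nil]
          · exact spec.2

-- ===== VERDICT (by name: the statement is the Claim_ definition above) =====
theorem getMergeOrders_spec : Claim_equal_getMergeOrders := by
  intro nodes edges interconnected _hdom hpre
  unfold Spec_getMergeOrders
  cases interconnected with
  | false => rfl
  | true =>
      obtain ⟨hnd, hns, hwf, _hconn⟩ := hpre rfl
      exact main_true nodes edges hnd hns hwf
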